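-- pv_equiv track=rewrite | github.com/ColtonKor/MathForComputing | BNF.py | ruleTokenizer
-- ===== SOURCE A (Python) =====
-- def ruleTokenizer(s):
--     tokens=[]
--     token=''
--     t=0
--     escape=False
--     for c in s:
--         if c=='\\' and escape == False:
--             escape=True
--         elif escape==True:
--             escape=False
--             token+=c
--         elif c=='<' and t==0: #start of <id>
--             if len(token)>0:
--                 tokens.append(token)
--             token='<'
--             t=1
--         elif c=='>' and t==1: #end of <id>
--             token+=c
--             t=0
--             tokens.append(token)
--             token=''
--         elif t==0: # not in an <id>
--             if c==' ':
--                 tokens.append(token)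
--                 token=''
--             else:
--                 token+=c
--         elif t==1: #middle of <id>
--             token+=c
--     if len(token)!=0:
--         tokens.append(token)
--     return tokens
-- ===== SOURCE B (Python) =====
-- def ruleTokenizer(s):
--     # pass 1: resolve escapes into (char, escaped) pairs; a trailing lone backslash is dropped
--     pairs = []
--     i = 0
--     while i < len(s):
--         if s[i] == '\\':
--             if i + 1 < len(s):
--                 pairs.append((s[i + 1], True))
--             i += 2
--         else:
--             pairs.append((s[i], False))
--             i += 1
--     # pass 2: tokenize; escaped chars never act as delimiters
--     tokens = []
--     token = ''
--     t = 0
--     for c, esc in pairs: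
--         if esc:
--             token += c
--         elif c == '<' and t == 0:
--             if token:
--                 tokens.append(token)
--             token = '<'
--             t = 1
--         elif c == '>' and t == 1:
--             tokens.append(token + '>')
--             token = ''
--             t = 0
--         elif t == 0:
--             if c == ' ':
--                 tokens.append(token)
--                 token = ''
--             else:
--                 token += c
--         else:
--             token += c
--     if token:
--         tokens.append(token)
--     return tokens
-- ===== Notes on version B (the rewrite author's own statement) =====
-- stated objective: alternative
-- what changed: Replaces A's single loop that interleaves escape tracking with tokenizing by two separate passes: an index walk that first resolves backslash escapes into (char, escaped) pairs (dropping a trailing lone backslash), then a tokenizer over those pairs.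
import Mathlib
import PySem

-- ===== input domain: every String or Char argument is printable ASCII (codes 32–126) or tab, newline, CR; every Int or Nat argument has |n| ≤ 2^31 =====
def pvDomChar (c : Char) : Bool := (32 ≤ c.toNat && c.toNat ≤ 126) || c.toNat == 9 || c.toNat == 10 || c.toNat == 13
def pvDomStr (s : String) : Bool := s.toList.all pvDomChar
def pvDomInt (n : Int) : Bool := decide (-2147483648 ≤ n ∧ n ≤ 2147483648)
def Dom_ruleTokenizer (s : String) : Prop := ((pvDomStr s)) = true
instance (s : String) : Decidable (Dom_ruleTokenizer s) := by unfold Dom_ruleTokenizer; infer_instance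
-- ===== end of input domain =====

-- B splits A's single escape-tracking loop into two passes: escape resolution, then tokenizing; same outputs.

-- ===== PORT A =====
-- A's single loop over the characters, state (tokens, token, t, escape).
def pvLoopA : List Char → List String → String → Nat → Bool → List String
  | [], tokens, token, _, _ =>
      if token.length ≠ 0 then tokens ++ [token] else tokens
  | c :: rest, tokens, token, t, escape =>
      if c == '\\' && escape == false then
        pvLoopA rest tokens token t true
      else if escape == true then
        pvLoopA rest tokens (token.push c) t false
      else if c == '<' && t == 0 then
        pvLoopA rest (if token.length > 0 then tokens ++ [token] else tokens) "<" 1 escape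
      else if c == '>' && t == 1 then
        pvLoopA rest (tokens ++ [token.push c]) "" 0 escape
      else if t == 0 then
        (if c == ' ' then pvLoopA rest (tokens ++ [token]) "" t escape
         else pvLoopA rest tokens (token.push c) t escape)
      else if t == 1 then
        pvLoopA rest tokens (token.push c) t escape
      else
        pvLoopA rest tokens token t escape

def ruleTokenizer (s : String) : List String :=
  pvLoopA s.toList [] "" 0 false

-- ===== PORT B =====
-- pass 1: resolve escapes into (char, escaped) pairs; a trailing lone backslash is dropped
def pvPass1 : List Char → List (Char × Bool)
  | [] => []
  | c :: rest =>
      if c == '\\' then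
        match rest with
        | [] => []
        | d :: rest' => (d, true) :: pvPass1 rest'
      else (c, false) :: pvPass1 rest

-- pass 2: tokenize; escaped chars never act as delimiters
def pvPass2 : List (Char × Bool) → List String → String → Nat → List String
  | [], tokens, token, _ =>
      if token ≠ "" then tokens ++ [token] else tokens
  | (c, esc) :: rest, tokens, token, t =>
      if esc then
        pvPass2 rest tokens (token.push c) t
      else if c == '<' && t == 0 then
        pvPass2 rest (if token ≠ "" then tokens ++ [token] else tokens) "<" 1
      else if c == '>' && t == 1 then
        pvPass2 rest (tokens ++ [token.push c]) "" 0
      else if t == 0 then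
        (if c == ' ' then pvPass2 rest (tokens ++ [token]) "" 0
         else pvPass2 rest tokens (token.push c) 0)
      else
        pvPass2 rest tokens (token.push c) t

def ruleTokenizer_alt (s : String) : List String :=
  pvPass2 (pvPass1 s.toList) [] "" 0

-- ===== PRECONDITION & SPEC =====
def Spec_ruleTokenizer (s : String) (out : List String) : Prop := out = ruleTokenizer_alt s
instance (s : String) (out : List String) : Decidable (Spec_ruleTokenizer s out) := by unfold Spec_ruleTokenizer; infer_instance

-- ===== CLAIM (what is proved, stated in full; the proofs are below) =====
def Claim_equal_ruleTokenizer : Prop := ∀ (s : String), Dom_ruleTokenizer s → Spec_ruleTokenizer s (ruleTokenizer s)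

-- ===== LEMMAS AND PROOFS =====

theorem pv_len_pos (token : String) : (token.length > 0) = (token ≠ "") := by
  simp [Nat.pos_iff_ne_zero, String.length_eq_zero_iff]

theorem pv_loop_eq : ∀ (cs : List Char) (tokens : List String) (token : String) (t : Nat),
    t = 0 ∨ t = 1 → pvLoopA cs tokens token t false = pvPass2 (pvPass1 cs) tokens token t := by
  intro cs
  induction cs using pvPass1.induct with
  | case1 =>
      intro tokens token t _
      simp [pvLoopA, pvPass1, pvPass2]
  | case2 c hbs =>
      intro tokens token t _
      simp [pvLoopA, pvPass1, pvPass2, hbs]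
  | case3 c hbs d rest' ih =>
      intro tokens token t ht
      have hc : c = '\\' := by simpa using hbs
      subst hc
      simp only [pvPass1]
      show pvLoopA _ _ _ _ false = pvPass2 _ _ _ _
      rw [show pvLoopA ('\\' :: d :: rest') tokens token t false
            = pvLoopA (d :: rest') tokens token t true from by simp [pvLoopA]]
      rw [show pvLoopA (d :: rest') tokens token t true
            = pvLoopA rest' tokens (token.push d) t false from by simp [pvLoopA]]
      rw [if_pos hbs]
      rw [show pvPass2 ((d, true) :: pvPass1 rest') tokens token t
            = pvPass2 (pvPass1 rest') tokens (token.push d) t from by simp [pvPass2]]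
      exact ih tokens (token.push d) t ht
  | case4 c rest hne ih =>
      intro tokens token t ht
      have hc : (c == '\\') = false := by revert hne; cases (c == '\\') <;> simp
      have hp1 : pvPass1 (c :: rest) = (c, false) :: pvPass1 rest := by
        cases rest <;> simp [pvPass1, hc]
      rw [hp1]
      simp only [pvLoopA, pvPass2, hc, pv_len_pos, Bool.false_and,
        Bool.false_eq_true, if_false, show ((false : Bool) == true) = false from rfl]
      by_cases h1 : (c == '<' && t == 0) = true
      · simp only [if_pos h1]
        exact ih _ "<" 1 (Or.inr rfl)
      · simp only [if_neg h1]
        by_cases h2 : (c == '>' && t == 1) = true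
        · simp only [if_pos h2]
          exact ih _ "" 0 (Or.inl rfl)
        · simp only [if_neg h2]
          by_cases h3 : (t == 0) = true
          · have ht0 : t = 0 := by simpa using h3
            subst ht0
            simp only [if_pos h3]
            by_cases h4 : (c == ' ') = true
            · simp only [if_pos h4]; exact ih _ "" 0 (Or.inl rfl)
            · simp only [if_neg h4]; exact ih _ (token.push c) 0 (Or.inl rfl)
          · have ht1 : t = 1 := by
              rcases ht with h | h
              · exact absurd (by simp [h]) h3
              · exact h
            subst ht1
            simp only [if_neg h3, if_pos (by simp : ((1:Nat) == 1) = true)]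
            exact ih _ (token.push c) 1 (Or.inr rfl)

-- ===== VERDICT (by name: the statement is the Claim_ definition above) =====
theorem ruleTokenizer_spec : Claim_equal_ruleTokenizer := by
  intro s _
  unfold Spec_ruleTokenizer ruleTokenizer ruleTokenizer_alt
  exact pv_loop_eq s.toList [] "" 0 (Or.inl rfl)
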